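-- pv_equiv track=rewrite | github.com/DonghunLEE-CEE/CTM_PROJECT | src/ctm/network.py | ramp_indices_for_length
-- ===== SOURCE A (Python) =====
-- def ramp_indices_for_length(n_cells: int) -> tuple[list[int], list[int]]:
--     """
--     Each 10-cell block (1-based indexing within the block):
--     - 3rd cell -> off-ramp
--     - 7th cell -> on-ramp
--     Only include indices that exist (0-based cell index).
--     """
--     off: list[int] = []
--     on: list[int] = []
--     for block_start in range(0, n_cells, 10):
--         third = block_start + 2  # 1-based 3rd -> 0-based +2
--         seventh = block_start + 6
--         if third < n_cells:
--             off.append(third)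
--         if seventh < n_cells:
--             on.append(seventh)
--     return off, on
-- ===== SOURCE B (Python) =====
-- def ramp_indices_for_length(n_cells: int) -> tuple[list[int], list[int]]:
--     # Single pass over every individual cell (not over block starts):
--     # classify each cell by its residue mod 10 — residue 2 is the block's
--     # 3rd cell (off-ramp), residue 6 its 7th cell (on-ramp).
--     off: list[int] = []
--     on: list[int] = []
--     for i in range(n_cells):
--         r = i % 10
--         if r == 2:
--             off.append(i)
--         elif r == 6:
--             on.append(i)
--     return off, on
-- ===== Notes on version B (the rewrite author's own statement) =====
-- stated objective: alternative
-- what changed: Instead of iterating over 10-cell block starts and appending two guarded offsets per block, B scans every individual cell once and classifies it by its residue mod 10 (2 -> off-ramp, 6 -> on-ramp), so the block arithmetic and the '< n_cells' bound checks disappear; it trades a stride-10 loop for a per-cell residue test.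
import Mathlib
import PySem

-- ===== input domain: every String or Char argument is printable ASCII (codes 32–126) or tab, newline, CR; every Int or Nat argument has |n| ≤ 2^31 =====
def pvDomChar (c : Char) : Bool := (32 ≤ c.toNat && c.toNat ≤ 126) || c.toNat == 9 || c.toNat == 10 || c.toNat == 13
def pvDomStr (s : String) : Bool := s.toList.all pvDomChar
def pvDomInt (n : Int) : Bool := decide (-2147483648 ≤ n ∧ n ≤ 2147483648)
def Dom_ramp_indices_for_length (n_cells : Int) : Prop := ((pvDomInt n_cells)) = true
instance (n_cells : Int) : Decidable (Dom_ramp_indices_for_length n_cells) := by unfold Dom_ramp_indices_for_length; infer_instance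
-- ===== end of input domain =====

-- B replaces A's stride-10 loop over block starts (two guarded appends per
-- block) by a single per-cell pass classifying each cell by residue mod 10
-- (objective: alternative; same O(n) cost).

-- ===== PORT A =====
def ramp_indices_for_length (n_cells : Int) : List Int × List Int :=
  -- off, on accumulated over 'for block_start in range(0, n_cells, 10)'
  (PySem.List.pyRange 0 n_cells 10).foldl
    (fun (st : List Int × List Int) block_start =>
      let third := block_start + 2
      let seventh := block_start + 6
      let off := if third < n_cells then st.1 ++ [third] else st.1
      let on := if seventh < n_cells then st.2 ++ [seventh] else st.2
      (off, on))
    ([], [])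

-- ===== PORT B =====
def ramp_indices_for_length_alt (n_cells : Int) : List Int × List Int :=
  -- off, on accumulated over 'for i in range(n_cells)', classified by i % 10
  (PySem.List.pyRange 0 n_cells 1).foldl
    (fun (st : List Int × List Int) i =>
      let r := PySem.Int.mod i 10
      if r = 2 then (st.1 ++ [i], st.2)
      else if r = 6 then (st.1, st.2 ++ [i])
      else st)
    ([], [])

-- ===== PRECONDITION & SPEC =====
def Spec_ramp_indices_for_length (n_cells : Int) (out : List Int × List Int) : Prop := out = ramp_indices_for_length_alt n_cells
instance (n_cells : Int) (out : List Int × List Int) : Decidable (Spec_ramp_indices_for_length n_cells out) := by unfold Spec_ramp_indices_for_length; infer_instance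

-- ===== CLAIM (what is proved, stated in full; the proofs are below) =====
def Claim_equal_ramp_indices_for_length : Prop := ∀ (n_cells : Int), Dom_ramp_indices_for_length n_cells → Spec_ramp_indices_for_length n_cells (ramp_indices_for_length n_cells)

-- ===== LEMMAS AND PROOFS =====

theorem pyRange10_nil (a b : Int) (h : b ≤ a) : PySem.List.pyRange a b 10 = [] := by
  rw [PySem.List.pyRange_of_pos a b (by norm_num), if_neg (not_lt.2 h)]
  simp

theorem pyRange10_cons (a b : Int) (h : a < b) :
    PySem.List.pyRange a b 10 = a :: PySem.List.pyRange (a + 10) b 10 := by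
  rw [PySem.List.pyRange_of_pos a b (by norm_num),
      PySem.List.pyRange_of_pos (a + 10) b (by norm_num), if_pos h]
  have hc : ((b - a + 10 - 1) / 10).toNat =
      (if a + 10 < b then ((b - (a + 10) + 10 - 1) / 10).toNat else 0) + 1 := by
    split_ifs with h2 <;> omega
  rw [hc, List.range_succ_eq_map, List.map_cons, List.map_map]
  refine congrArg₂ List.cons (by norm_num) (List.map_congr_left fun k _ => ?_)
  simp only [Function.comp_apply]
  push_cast; ring

-- closed form of A's loop from an arbitrary block start
theorem loop_closed (n : Int) (s : Int) (off on : List Int) :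
    (PySem.List.pyRange s n 10).foldl
      (fun (st : List Int × List Int) block_start =>
        let third := block_start + 2
        let seventh := block_start + 6
        let off := if third < n then st.1 ++ [third] else st.1
        let on := if seventh < n then st.2 ++ [seventh] else st.2
        (off, on))
      (off, on)
    = (off ++ PySem.List.pyRange (s + 2) n 10, on ++ PySem.List.pyRange (s + 6) n 10) := by
  by_cases h : s < n
  · rw [pyRange10_cons s n h, List.foldl_cons]
    have ih := loop_closed n (s + 10)
      (if s + 2 < n then off ++ [s + 2] else off)
      (if s + 6 < n then on ++ [s + 6] else on)
    simp only [] at ih ⊢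
    rw [ih]
    congr 1
    · by_cases h2 : s + 2 < n
      · rw [if_pos h2, pyRange10_cons (s + 2) n h2]
        simp; ring_nf
      · rw [if_neg h2, pyRange10_nil (s + 2) n (by omega),
            pyRange10_nil (s + 10 + 2) n (by omega)]
    · by_cases h6 : s + 6 < n
      · rw [if_pos h6, pyRange10_cons (s + 6) n h6]
        simp; ring_nf
      · rw [if_neg h6, pyRange10_nil (s + 6) n (by omega),
            pyRange10_nil (s + 10 + 6) n (by omega)]
  · rw [pyRange10_nil s n (by omega), pyRange10_nil (s + 2) n (by omega),
        pyRange10_nil (s + 6) n (by omega)]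
    simp
termination_by (n - s).toNat
decreasing_by omega

-- closed form of B's per-cell loop from an arbitrary cell s: the pending
-- off-ramps are the stride-10 range starting at the next index ≥ s with
-- residue 2 (namely s + (2 - s) % 10), likewise residue 6 for on-ramps.
theorem loop_closed_alt (n : Int) (s : Int) (off on : List Int) :
    (PySem.List.pyRange s n 1).foldl
      (fun (st : List Int × List Int) i =>
        let r := PySem.Int.mod i 10
        if r = 2 then (st.1 ++ [i], st.2)
        else if r = 6 then (st.1, st.2 ++ [i])
        else st)
      (off, on)
    = (off ++ PySem.List.pyRange (s + (2 - s) % 10) n 10,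
       on ++ PySem.List.pyRange (s + (6 - s) % 10) n 10) := by
  by_cases h : s < n
  · rw [PySem.List.pyRange_one_cons h, List.foldl_cons]
    simp only [PySem.Int.mod_eq_emod_of_pos (a := s) (b := 10) (by norm_num)]
    by_cases h2 : s % 10 = 2
    · rw [if_pos h2, loop_closed_alt n (s + 1) (off ++ [s]) on]
      have e2 : s + (2 - s) % 10 = s := by omega
      have e2' : s + 1 + (2 - (s + 1)) % 10 = s + 10 := by omega
      have e6 : s + (6 - s) % 10 = s + 1 + (6 - (s + 1)) % 10 := by omega
      rw [e2, e2', e6, pyRange10_cons s n h]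
      simp
    · by_cases h6 : s % 10 = 6
      · rw [if_neg (by omega), if_pos h6, loop_closed_alt n (s + 1) off (on ++ [s])]
        have e6 : s + (6 - s) % 10 = s := by omega
        have e6' : s + 1 + (6 - (s + 1)) % 10 = s + 10 := by omega
        have e2 : s + (2 - s) % 10 = s + 1 + (2 - (s + 1)) % 10 := by omega
        rw [e6, e6', e2, pyRange10_cons s n h]
        simp
      · rw [if_neg (by omega), if_neg (by omega), loop_closed_alt n (s + 1) off on]
        have e2 : s + (2 - s) % 10 = s + 1 + (2 - (s + 1)) % 10 := by omega
        have e6 : s + (6 - s) % 10 = s + 1 + (6 - (s + 1)) % 10 := by omega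
        rw [e2, e6]
  · rw [PySem.List.pyRange_one_eq_nil (by omega),
        pyRange10_nil (s + (2 - s) % 10) n (by omega),
        pyRange10_nil (s + (6 - s) % 10) n (by omega)]
    simp
termination_by (n - s).toNat
decreasing_by all_goals omega

-- ===== VERDICT (by name: the statement is the Claim_ definition above) =====
theorem ramp_indices_for_length_spec : Claim_equal_ramp_indices_for_length := by
  intro n _
  unfold Spec_ramp_indices_for_length ramp_indices_for_length ramp_indices_for_length_alt
  rw [loop_closed n 0 [] [], loop_closed_alt n 0 [] []]
  norm_num
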